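-- pv_equiv track=rewrite | github.com/NexGenAnalytics/WorkVisualizer | analysis/slicing/g3_analyze_graph.py | find_largest_repeating_subpattern
-- ===== SOURCE A (Python) =====
-- def find_largest_repeating_subpattern(numbers):
--     n = len(numbers)
--     max_repeats = 0
--     best_start = -1
--     best_len = 0
--
--     # Try every possible length of pattern from 1 to n/2
--     for pattern_length in range(1, n // 2 + 1):
--         # Try every possible starting point for the pattern
--         for start in range(n - pattern_length):
--             current_pattern = numbers[start:start + pattern_length]
--             count = 0
--
--             # Count repetitions of the pattern starting from the current start
--             for i in range(start, n - pattern_length + 1, pattern_length):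
--                 if numbers[i:i + pattern_length] == current_pattern:
--                     count += 1
--                 else:
--                     break  # As soon as pattern does not match, stop counting
--
--             # If the number of repetitions with the current pattern is greater than the max found so far, update
--             if count > max_repeats:
--                 max_repeats = count
--                 best_start = start
--                 best_len = pattern_length
--
--     if max_repeats > 1:  # Return only if a repeating pattern is found
--         return (best_start, max_repeats, best_len)
--     else:
--         return None  # No repeating pattern found
-- ===== SOURCE B (Python) =====
-- def find_largest_repeating_subpattern(numbers):
--     n = len(numbers)
--     max_repeats = 0
--     best_start = -1
--     best_len = 0
--
--     for pattern_length in range(1, n // 2 + 1):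
--         # e[s] = longest common extension between positions s and s + pattern_length
--         e = [0] * (n + 1)
--         for s in range(n - pattern_length - 1, -1, -1):
--             if numbers[s] == numbers[s + pattern_length]:
--                 e[s] = e[s + 1] + 1
--         for start in range(n - pattern_length):
--             count = 1 + e[start] // pattern_length
--             if count > max_repeats:
--                 max_repeats = count
--                 best_start = start
--                 best_len = pattern_length
--
--     if max_repeats > 1:
--         return (best_start, max_repeats, best_len)
--     else:
--         return None
-- ===== Notes on version B (the rewrite author's own statement) =====
-- stated objective: faster
-- what changed: Replaces A's per-(length,start) block-by-block slice comparison loop with a per-length right-to-left longest-common-extension table e (e[s]=e[s+1]+1 on match), so the repeat count is 1 + e[start]//length in O(1).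
import Mathlib
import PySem

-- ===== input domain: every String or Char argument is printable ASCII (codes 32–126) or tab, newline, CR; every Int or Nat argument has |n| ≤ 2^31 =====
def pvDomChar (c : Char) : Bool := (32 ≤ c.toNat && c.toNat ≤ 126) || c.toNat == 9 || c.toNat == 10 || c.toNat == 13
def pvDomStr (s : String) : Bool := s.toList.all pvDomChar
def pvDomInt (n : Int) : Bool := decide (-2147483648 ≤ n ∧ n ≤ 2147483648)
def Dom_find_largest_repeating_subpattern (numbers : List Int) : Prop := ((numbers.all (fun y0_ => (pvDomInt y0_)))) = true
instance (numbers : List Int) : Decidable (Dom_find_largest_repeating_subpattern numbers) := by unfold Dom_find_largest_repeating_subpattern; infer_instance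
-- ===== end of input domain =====

-- B replaces A's per-(length,start) block-by-block rescan with a per-length longest-common-extension
-- table, making the repeat count an O(1) lookup (measured faster at large sizes; O(n^2) vs O(n^3)).


-- ===== PORT A =====
-- the inner 'for i in range(start, n - pattern_length + 1, pattern_length): … else break' loop
def pvCountLoopA (numbers pat : List Int) (L : Int) : List Int → Int → Int
  | [], count => count
  | i :: rest, count =>
    if PySem.List.slice numbers (some i) (some (i + L)) = pat then
      pvCountLoopA numbers pat L rest (count + 1)
    else count

def find_largest_repeating_subpattern (numbers : List Int) : Option (List Int) :=
  let n : Int := (numbers.length : Int)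
  -- state = (max_repeats, best_start, best_len)
  let st :=
    (PySem.List.pyRange 1 (PySem.Int.floordiv n 2 + 1) 1).foldl (fun acc pattern_length =>
      (PySem.List.pyRange 0 (n - pattern_length) 1).foldl (fun acc start =>
        let current_pattern := PySem.List.slice numbers (some start) (some (start + pattern_length))
        let count := pvCountLoopA numbers current_pattern pattern_length
          (PySem.List.pyRange start (n - pattern_length + 1) pattern_length) 0
        if acc.1 < count then (count, start, pattern_length) else acc) acc)
      ((0 : Int), (-1 : Int), (0 : Int))
  if 1 < st.1 then some [st.2.1, st.1, st.2.2] else none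

-- ===== PORT B =====
def find_largest_repeating_subpattern_alt (numbers : List Int) : Option (List Int) :=
  let n : Int := (numbers.length : Int)
  let st :=
    (PySem.List.pyRange 1 (PySem.Int.floordiv n 2 + 1) 1).foldl (fun acc pattern_length =>
      -- e[s] = longest common extension between positions s and s + pattern_length
      let e :=
        (PySem.List.pyRange (n - pattern_length - 1) (-1) (-1)).foldl (fun e s =>
          if PySem.List.pyGetD numbers s 0 = PySem.List.pyGetD numbers (s + pattern_length) 0 then
            PySem.List.pySetD e s (PySem.List.pyGetD e (s + 1) 0 + 1)
          else e)
          (List.replicate (n.toNat + 1) (0 : Int))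
      (PySem.List.pyRange 0 (n - pattern_length) 1).foldl (fun acc start =>
        let count := 1 + PySem.Int.floordiv (PySem.List.pyGetD e start 0) pattern_length
        if acc.1 < count then (count, start, pattern_length) else acc) acc)
      ((0 : Int), (-1 : Int), (0 : Int))
  if 1 < st.1 then some [st.2.1, st.1, st.2.2] else none

-- ===== PRECONDITION & SPEC =====
def Spec_find_largest_repeating_subpattern (numbers : List Int) (out : Option (List Int)) : Prop := out = find_largest_repeating_subpattern_alt numbers
instance (numbers : List Int) (out : Option (List Int)) : Decidable (Spec_find_largest_repeating_subpattern numbers out) := by unfold Spec_find_largest_repeating_subpattern; infer_instance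

-- ===== CLAIM (what is proved, stated in full; the proofs are below) =====
def Claim_equal_find_largest_repeating_subpattern : Prop := ∀ (numbers : List Int), Dom_find_largest_repeating_subpattern numbers → Spec_find_largest_repeating_subpattern numbers (find_largest_repeating_subpattern numbers)

-- ===== LEMMAS AND PROOFS =====

-- common prefix length of two lists (specification of B's extension table)
def pvCpl : List Int → List Int → Nat
  | a :: as, b :: bs => if a = b then pvCpl as bs + 1 else 0
  | _, _ => 0

theorem pvCpl_nil_right (a : List Int) : pvCpl a [] = 0 := by
  cases a <;> rfl



theorem pvCpl_le_right : ∀ (a b : List Int), pvCpl a b ≤ b.length := by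
  intro a
  induction a with
  | nil => intro b; cases b <;> simp [pvCpl]
  | cons x as ih =>
    intro b
    cases b with
    | nil => simp [pvCpl]
    | cons y bs =>
      by_cases h : x = y
      · simpa [pvCpl, h] using ih bs
      · simp [pvCpl, h]

theorem pvCpl_getD : ∀ (a b : List Int) (r : Nat), r < pvCpl a b →
    a.getD r 0 = b.getD r 0 := by
  intro a
  induction a with
  | nil => intro b r h; cases b <;> simp [pvCpl] at h
  | cons x as ih =>
    intro b r h
    cases b with
    | nil => simp [pvCpl] at h
    | cons y bs =>
      by_cases hxy : x = y
      · cases r with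
        | zero => simp [hxy]
        | succ r' =>
          simp only [pvCpl, if_pos hxy] at h
          simpa using ih bs r' (by omega)
      · simp [pvCpl, hxy] at h

theorem pvCpl_ge : ∀ (a b : List Int) (d : Nat), d ≤ a.length → d ≤ b.length →
    (∀ r < d, a.getD r 0 = b.getD r 0) → d ≤ pvCpl a b := by
  intro a
  induction a with
  | nil => intro b d h1 _ _; simp at h1; omega
  | cons x as ih =>
    intro b d h1 h2 h3
    cases b with
    | nil => simp at h2; omega
    | cons y bs =>
      cases d with
      | zero => omega
      | succ d' =>
        have hxy : x = y := by simpa using h3 0 (by omega)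
        have := ih bs d' (by simpa using h1) (by simpa using h2)
          (fun r hr => by simpa using h3 (r + 1) (by omega))
        simp only [pvCpl, if_pos hxy]
        omega

theorem pvGetD_drop (xs : List Int) (k r : Nat) :
    (xs.drop k).getD r 0 = xs.getD (k + r) 0 := by
  simp [List.getD_eq_getElem?_getD, List.getElem?_drop]

theorem pvCpl_drop_succ (xs : List Int) (k L : Nat) (h : k + L < xs.length) :
    pvCpl (xs.drop k) (xs.drop (k + L)) =
      if xs.getD k 0 = xs.getD (k + L) 0
      then pvCpl (xs.drop (k + 1)) (xs.drop (k + 1 + L)) + 1 else 0 := by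
  have hk : k < xs.length := by omega
  have hkL : k + L < xs.length := h
  rw [List.drop_eq_getElem_cons hk, List.drop_eq_getElem_cons hkL]
  have e1 : xs.getD k 0 = xs[k] := List.getD_eq_getElem xs 0 hk
  have e2 : xs.getD (k + L) 0 = xs[k + L] := List.getD_eq_getElem xs 0 hkL
  have e3 : k + L + 1 = k + 1 + L := by omega
  simp only [pvCpl, e1, e2, e3]

theorem pvPeriodic (xs : List Int) (s L m : Nat) (hL : 1 ≤ L)
    (h : ∀ r < m, xs.getD (s + r) 0 = xs.getD (s + L + r) 0) :
    ∀ r, r < m + L → xs.getD (s + r) 0 = xs.getD (s + r % L) 0 := by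
  intro r
  induction r using Nat.strong_induction_on with
  | _ r ih =>
    intro hr
    by_cases hrL : r < L
    · rw [Nat.mod_eq_of_lt hrL]
    · have h1 : r - L < m := by omega
      have h2 := h (r - L) h1
      have e1 : s + L + (r - L) = s + r := by omega
      rw [e1] at h2
      have h3 := ih (r - L) (by omega) (by omega)
      have e2 : (r - L) % L = r % L := by
        conv_rhs => rw [show r = (r - L) + L by omega]
        rw [Nat.add_mod_right]
      rw [← h2, h3, e2]

theorem pvCpl_drop_zero (xs : List Int) (k L : Nat) (h : xs.length ≤ k + L) :
    pvCpl (xs.drop k) (xs.drop (k + L)) = 0 := by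
  have hnil : xs.drop (k + L) = [] := by
    apply List.drop_eq_nil_of_le; omega
  rw [hnil, pvCpl_nil_right]

theorem pvBlockEqPoint (xs : List Int) (s L j : Nat) (hL : 1 ≤ L)
    (hj : j * L ≤ pvCpl (xs.drop s) (xs.drop (s + L))) :
    ∀ m < L, xs.getD (s + j * L + m) 0 = xs.getD (s + m) 0 := by
  intro m hm
  have hshift : ∀ r < j * L, xs.getD (s + r) 0 = xs.getD (s + L + r) 0 := by
    intro r hr
    have := pvCpl_getD (xs.drop s) (xs.drop (s + L)) r (by omega)
    rw [pvGetD_drop, pvGetD_drop] at this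
    exact this
  have hper := pvPeriodic xs s L (j * L) hL hshift
  have h1 := hper (j * L + m) (by omega)
  have h2 : (j * L + m) % L = m := by
    rw [Nat.mul_comm, Nat.mul_add_mod_self_left]
    exact Nat.mod_eq_of_lt hm
  rw [show s + j * L + m = s + (j * L + m) by omega, h1, h2]

theorem pvBlockEqIff (xs : List Int) (s L j : Nat)
    (hfull : s + j * L + L ≤ xs.length) :
    ((xs.drop (s + j * L)).take L = (xs.drop s).take L ↔
      ∀ m < L, xs.getD (s + j * L + m) 0 = xs.getD (s + m) 0) := by
  have l1 : ((xs.drop (s + j * L)).take L).length = L := by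
    simp; omega
  have l2 : ((xs.drop s).take L).length = L := by
    simp; omega
  constructor
  · intro heq m hm
    have hm1 : s + j * L + m < xs.length := by omega
    have hm2 : s + m < xs.length := by omega
    have := congrArg (fun l => l.getD m 0) heq
    simp only at this
    rw [List.getD_eq_getElem _ _ (by omega), List.getD_eq_getElem _ _ (by omega)] at this
    rw [List.getElem_take, List.getElem_drop, List.getElem_take, List.getElem_drop] at this
    rw [List.getD_eq_getElem _ _ hm1, List.getD_eq_getElem _ _ hm2]
    exact this
  · intro h
    apply List.ext_getElem (by rw [l1, l2])
    intro m hm1 hm2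
    rw [List.getElem_take, List.getElem_drop, List.getElem_take, List.getElem_drop]
    have hmL : m < L := by rw [l1] at hm1; exact hm1
    have := h m hmL
    rw [List.getD_eq_getElem _ _ (by omega), List.getD_eq_getElem _ _ (by omega)] at this
    exact this

theorem pvBlockNe (xs : List Int) (s L : Nat) (hL : 1 ≤ L)
    (hfull : s + (pvCpl (xs.drop s) (xs.drop (s + L)) / L + 1) * L + L ≤ xs.length) :
    ¬ ((xs.drop (s + (pvCpl (xs.drop s) (xs.drop (s + L)) / L + 1) * L)).take L
        = (xs.drop s).take L) := by
  set c := pvCpl (xs.drop s) (xs.drop (s + L)) with hc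
  set K := c / L with hK
  have eKL : (K + 1) * L = K * L + L := by ring
  intro heq
  rw [pvBlockEqIff xs s L (K + 1) (by rw [eKL]; rw [eKL] at hfull; omega)] at heq
  rw [eKL] at hfull
  -- every block q ≤ K+1 equals block 0 pointwise
  have hblock : ∀ q ≤ K + 1, ∀ m < L, xs.getD (s + q * L + m) 0 = xs.getD (s + m) 0 := by
    intro q hq m hm
    rcases Nat.lt_or_ge q (K + 1) with hq' | hq'
    · exact pvBlockEqPoint xs s L q hL (by
        have h1 : q * L ≤ K * L := Nat.mul_le_mul_right L (by omega)
        have h2 := Nat.div_mul_le_self c L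
        rw [hK] at h1; omega) m hm
    · have hqe : q = K + 1 := by omega
      subst hqe; exact heq m hm
  -- hence the common extension is ≥ (K+1)*L
  have hge : (K + 1) * L ≤ c := by
    rw [hc, eKL]
    apply pvCpl_ge
    · rw [List.length_drop]
      have h2 := Nat.div_mul_le_self c L
      have h3 := pvCpl_le_right (xs.drop s) (xs.drop (s + L))
      rw [List.length_drop] at h3
      rw [← hc] at h3
      omega
    · rw [List.length_drop]
      have h3 := pvCpl_le_right (xs.drop s) (xs.drop (s + L))
      rw [List.length_drop] at h3
      rw [← hc] at h3
      omega
    · intro r hr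
      rw [← eKL] at hr
      rw [pvGetD_drop, pvGetD_drop]
      have hrL : r % L < L := Nat.mod_lt _ (by omega)
      have hq : r / L ≤ K := by
        have h4 : r / L < K + 1 := Nat.div_lt_of_lt_mul (by rw [Nat.mul_comm]; exact hr)
        omega
      have hdm := Nat.div_add_mod r L
      have e1 : s + r = s + (r / L) * L + r % L := by
        rw [Nat.mul_comm] at hdm; omega
      have e2 : s + L + r = s + (r / L + 1) * L + r % L := by
        rw [show (r / L + 1) * L = (r / L) * L + L from by ring]
        rw [Nat.mul_comm] at hdm; omega
      rw [e1, e2, hblock (r / L) (by omega) (r % L) hrL,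
        hblock (r / L + 1) (by omega) (r % L) hrL]
  have hfin := (Nat.le_div_iff_mul_le (by omega : 0 < L)).mpr hge
  rw [← hK] at hfin
  omega

theorem pvCountLoopA_eq_takeWhile (xs pat : List Int) (L : Int) :
    ∀ (l : List Int) (c : Int),
      pvCountLoopA xs pat L l c =
        c + ((l.takeWhile
          (fun i => decide (PySem.List.slice xs (some i) (some (i + L)) = pat))).length : Int) := by
  intro l
  induction l with
  | nil => intro c; simp [pvCountLoopA]
  | cons i rest ih =>
    intro c
    by_cases h : PySem.List.slice xs (some i) (some (i + L)) = pat
    · rw [pvCountLoopA, if_pos h, ih]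
      simp [h]
      omega
    · rw [pvCountLoopA, if_neg h]
      simp [h]

theorem pvTakeWhileLen {α : Type} (q : α → Bool) :
    ∀ (l : List α) (m : Nat), (hm : m ≤ l.length) →
      (∀ j (hj : j < m), q (l[j]'(by omega)) = true) →
      (m = l.length ∨ ∃ hm : m < l.length, q (l[m]'hm) = false) →
      (l.takeWhile q).length = m := by
  intro l
  induction l with
  | nil => intro m hm _ _; simp at hm; simp [hm]
  | cons x t ih =>
    intro m hm hall hstop
    cases m with
    | zero =>
      rcases hstop with h | ⟨h1, h2⟩
      · simp at h
      · simp at h2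
        simp [h2]
    | succ m' =>
      have hx : q x = true := hall 0 (by omega)
      rw [List.takeWhile_cons, hx]
      simp only [if_true, List.length_cons]
      have := ih m' (by simp at hm; omega)
        (fun j hj => by simpa using hall (j + 1) (by omega))
        (by
          rcases hstop with h | ⟨h1, h2⟩
          · left; simp at h; omega
          · right; exact ⟨by simp at h1; omega, by simpa using h2⟩)
      omega

theorem pvCountA_eq (xs : List Int) (s L : Nat) (hL : 1 ≤ L) (hs : s + L < xs.length) :
    pvCountLoopA xs (PySem.List.slice xs (some (s : Int)) (some ((s : Int) + (L : Int)))) (L : Int)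
        (PySem.List.pyRange (s : Int) ((xs.length : Int) - (L : Int) + 1) (L : Int)) 0
      = 1 + ((pvCpl (xs.drop s) (xs.drop (s + L)) / L : Nat) : Int) := by
  set n := xs.length with hn
  set c := pvCpl (xs.drop s) (xs.drop (s + L)) with hc
  set K := c / L with hKdef
  have hLpos : (0 : Int) < (L : Int) := by exact_mod_cast hL
  have hcle : c ≤ n - s - L := by
    have := pvCpl_le_right (xs.drop s) (xs.drop (s + L))
    rw [List.length_drop] at this
    omega
  have hKL : K * L ≤ c := Nat.div_mul_le_self c L
  -- the iteration range
  have hrange : PySem.List.pyRange (s : Int) ((n : Int) - (L : Int) + 1) (L : Int)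
      = (List.range ((n - s) / L)).map (fun k => ((s + k * L : Nat) : Int)) := by
    rw [PySem.List.pyRange_of_pos _ _ hLpos]
    have hab : (s : Int) < (n : Int) - (L : Int) + 1 := by omega
    rw [if_pos hab]
    have e1 : ((n : Int) - (L : Int) + 1 - (s : Int) + (L : Int) - 1) = ((n - s : Nat) : Int) := by
      omega
    rw [e1]
    have e2 : ((n - s : Nat) : Int) / (L : Int) = (((n - s) / L : Nat) : Int) := by
      exact_mod_cast (Int.natCast_div (n - s) L).symm
    rw [e2, Int.toNat_natCast]
    apply List.map_congr_left
    intro k _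
    push_cast; ring
  rw [hrange, pvCountLoopA_eq_takeWhile, List.takeWhile_map, List.length_map]
  set nb := (n - s) / L with hnb
  have hnbK : K + 1 ≤ nb := by
    have h1 : (n - s) = (n - s - L) + L := by omega
    have h2 : nb = (n - s - L) / L + 1 := by
      rw [hnb]
      conv_lhs => rw [h1]
      rw [Nat.add_div_right _ (by omega)]
    have h3 : K ≤ (n - s - L) / L := Nat.div_le_div_right hcle
    omega
  have hnbmul : nb * L ≤ n - s := Nat.div_mul_le_self _ _
  -- pattern as take/drop
  have hpat : PySem.List.slice xs (some (s : Int)) (some ((s : Int) + (L : Int)))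
      = (xs.drop s).take L := PySem.List.slice_natCast_add xs s L
  -- the per-index predicate
  have hblock : ∀ j : Nat, PySem.List.slice xs (some ((s + j * L : Nat) : Int))
      (some (((s + j * L : Nat) : Int) + (L : Int))) = (xs.drop (s + j * L)).take L :=
    fun j => PySem.List.slice_natCast_add xs (s + j * L) L
  rw [hpat]
  have hlen : (List.takeWhile
      (fun k : Nat => decide (PySem.List.slice xs (some ((s + k * L : Nat) : Int))
        (some (((s + k * L : Nat) : Int) + (L : Int))) = (xs.drop s).take L))
      (List.range nb)).length = K + 1 := by
    apply pvTakeWhileLen _ _ (K + 1) (by simpa using hnbK)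
    · intro j hj
      simp only [List.getElem_range, decide_eq_true_eq]
      rw [hblock j]
      have hjK : j ≤ K := by omega
      have hjL : j * L ≤ c := by
        calc j * L ≤ K * L := Nat.mul_le_mul_right L hjK
        _ ≤ c := hKL
      rw [pvBlockEqIff xs s L j (by omega)]
      exact pvBlockEqPoint xs s L j hL hjL
    · by_cases hKnb : K + 1 = nb
      · left; simpa using hKnb
      · right
        refine ⟨by simpa using (by omega : K + 1 < nb), ?_⟩
        simp only [List.getElem_range, decide_eq_false_iff_not]
        rw [hblock (K + 1)]
        have hfull : s + (K + 1) * L + L ≤ n := by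
          have h1 : (K + 2) * L ≤ nb * L := Nat.mul_le_mul_right L (by omega)
          have h2 : (K + 2) * L = (K + 1) * L + L := by ring
          omega
        exact pvBlockNe xs s L hL (by omega)
  simp only [Function.comp_def]
  rw [hlen]
  omega

theorem pvTableInv (xs : List Int) (L : Nat) (hL : 1 ≤ L) :
    ∀ (m : Nat), m + L ≤ xs.length → ∀ (e0 : List Int),
      e0.length = xs.length + 1 →
      (∀ k : Nat, m ≤ k → e0.getD k 0 = ((pvCpl (xs.drop k) (xs.drop (k + L)) : Nat) : Int)) →
      (∀ k : Nat, k < m → e0.getD k 0 = 0) →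
      ∀ k : Nat,
        (((PySem.List.pyRange 0 (m : Int) 1).reverse).foldl (fun e s =>
          if PySem.List.pyGetD xs s 0 = PySem.List.pyGetD xs (s + (L : Int)) 0 then
            PySem.List.pySetD e s (PySem.List.pyGetD e (s + 1) 0 + 1)
          else e) e0).getD k 0 = ((pvCpl (xs.drop k) (xs.drop (k + L)) : Nat) : Int) := by
  intro m
  induction m with
  | zero =>
    intro _ e0 _ hge _ k
    rw [PySem.List.pyRange_one_eq_nil (by omega)]
    simpa using hge k (by omega)
  | succ m ih =>
    intro hm e0 hlen hge hlt k
    have hsplit : PySem.List.pyRange 0 ((m + 1 : Nat) : Int) 1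
        = PySem.List.pyRange 0 (m : Int) 1 ++ [(m : Int)] := by
      rw [show ((m + 1 : Nat) : Int) = (m : Int) + 1 from by push_cast; ring]
      exact PySem.List.pyRange_one_succ_right (by positivity)
    rw [hsplit, List.reverse_append, List.reverse_singleton, List.singleton_append,
      List.foldl_cons]
    set e1 := (if PySem.List.pyGetD xs (m : Int) 0 = PySem.List.pyGetD xs ((m : Int) + (L : Int)) 0 then
        PySem.List.pySetD e0 (m : Int) (PySem.List.pyGetD e0 ((m : Int) + 1) 0 + 1)
      else e0) with he1
    -- normalise the Python primitives on Nat-cast indices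
    have hxm : PySem.List.pyGetD xs (m : Int) 0 = xs.getD m 0 := PySem.List.pyGetD_natCast xs m 0
    have hxmL : PySem.List.pyGetD xs ((m : Int) + (L : Int)) 0 = xs.getD (m + L) 0 := by
      rw [show (m : Int) + (L : Int) = ((m + L : Nat) : Int) from by push_cast; ring]
      exact PySem.List.pyGetD_natCast xs (m + L) 0
    have hem1 : PySem.List.pyGetD e0 ((m : Int) + 1) 0 = e0.getD (m + 1) 0 := by
      rw [show (m : Int) + 1 = ((m + 1 : Nat) : Int) from by push_cast; ring]
      exact PySem.List.pyGetD_natCast e0 (m + 1) 0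
    have hset : PySem.List.pySetD e0 (m : Int) (e0.getD (m + 1) 0 + 1) = e0.set m (e0.getD (m + 1) 0 + 1) :=
      PySem.List.pySetD_natCast e0 m _
    have hrec := pvCpl_drop_succ xs m L (by omega)
    have hgetset : ∀ (v : Int) (k' : Nat), (e0.set m v).getD k' 0 = if k' = m then v else e0.getD k' 0 := by
      intro v k'
      by_cases h : k' = m
      · subst h
        rw [if_pos rfl, List.getD_eq_getElem?_getD, List.getElem?_set, if_pos rfl,
          if_pos (by rw [hlen]; omega)]
        rfl
      · rw [if_neg h, List.getD_eq_getElem?_getD, List.getElem?_set,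
          if_neg (by omega), ← List.getD_eq_getElem?_getD]
    apply ih (by omega) e1
    · rw [he1]; split
      · rw [hem1, hset, List.length_set]; exact hlen
      · exact hlen
    · intro k' hk'
      rcases Nat.eq_or_lt_of_le hk' with he | hlt'
      · -- k' = m : the new entry satisfies the recurrence
        subst he
        rw [he1, hxm, hxmL, hrec]
        by_cases hcond : xs.getD m 0 = xs.getD (m + L) 0
        · rw [if_pos hcond, if_pos hcond, hem1, hset, hgetset]
          rw [if_pos rfl, hge (m + 1) (by omega)]
          push_cast; ring
        · rw [if_neg hcond, if_neg hcond]
          simpa using hlt m (by omega)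
      · rw [he1]; split
        · rw [hem1, hset, hgetset, if_neg (by omega)]
          exact hge k' (by omega)
        · exact hge k' (by omega)
    · intro k' hk'
      rw [he1]; split
      · rw [hem1, hset, hgetset, if_neg (by omega)]
        exact hlt k' (by omega)
      · exact hlt k' (by omega)

theorem pvReplicateGetD (c k : Nat) : (List.replicate c (0 : Int)).getD k 0 = 0 := by
  rw [List.getD_eq_getElem?_getD, List.getElem?_replicate]
  split <;> rfl

-- ===== VERDICT (by name: the statement is the Claim_ definition above) =====
theorem find_largest_repeating_subpattern_spec : Claim_equal_find_largest_repeating_subpattern := by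
  intro xs _
  show find_largest_repeating_subpattern xs = find_largest_repeating_subpattern_alt xs
  have houter :
      (PySem.List.pyRange 1 (PySem.Int.floordiv ((xs.length : Int)) 2 + 1) 1).foldl
        (fun acc pattern_length =>
          (PySem.List.pyRange 0 ((xs.length : Int) - pattern_length) 1).foldl (fun acc start =>
            let current_pattern := PySem.List.slice xs (some start) (some (start + pattern_length))
            let count := pvCountLoopA xs current_pattern pattern_length
              (PySem.List.pyRange start ((xs.length : Int) - pattern_length + 1) pattern_length) 0
            if acc.1 < count then (count, start, pattern_length) else acc) acc)
        ((0 : Int), (-1 : Int), (0 : Int))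
      = (PySem.List.pyRange 1 (PySem.Int.floordiv ((xs.length : Int)) 2 + 1) 1).foldl
        (fun acc pattern_length =>
          let e :=
            (PySem.List.pyRange ((xs.length : Int) - pattern_length - 1) (-1) (-1)).foldl (fun e s =>
              if PySem.List.pyGetD xs s 0 = PySem.List.pyGetD xs (s + pattern_length) 0 then
                PySem.List.pySetD e s (PySem.List.pyGetD e (s + 1) 0 + 1)
              else e)
              (List.replicate (((xs.length : Int)).toNat + 1) (0 : Int))
          (PySem.List.pyRange 0 ((xs.length : Int) - pattern_length) 1).foldl (fun acc start =>
            let count := 1 + PySem.Int.floordiv (PySem.List.pyGetD e start 0) pattern_length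
            if acc.1 < count then (count, start, pattern_length) else acc) acc)
        ((0 : Int), (-1 : Int), (0 : Int)) := by
    apply PySem.List.foldl_congr_mem
    intro acc L hmem
    rw [PySem.List.mem_pyRange_one] at hmem
    obtain ⟨LN, rfl⟩ : ∃ m : Nat, L = (m : Int) :=
      ⟨L.toNat, (Int.toNat_of_nonneg (by omega)).symm⟩
    have hLN1 : 1 ≤ LN := by exact_mod_cast hmem.1
    -- B's extension table is pvCpl
    have htab : ∀ k : Nat,
        ((PySem.List.pyRange ((xs.length : Int) - (LN : Int) - 1) (-1) (-1)).foldl (fun e s =>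
          if PySem.List.pyGetD xs s 0 = PySem.List.pyGetD xs (s + (LN : Int)) 0 then
            PySem.List.pySetD e s (PySem.List.pyGetD e (s + 1) 0 + 1)
          else e)
          (List.replicate (((xs.length : Int)).toNat + 1) (0 : Int))).getD k 0
        = ((pvCpl (xs.drop k) (xs.drop (k + LN)) : Nat) : Int) := by
      intro k
      by_cases hLle : LN ≤ xs.length
      · have hrng : PySem.List.pyRange ((xs.length : Int) - (LN : Int) - 1) (-1) (-1)
            = (PySem.List.pyRange 0 ((xs.length - LN : Nat) : Int) 1).reverse := by
          rw [PySem.List.pyRange_neg_one_eq_reverse]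
          norm_num
          congr 1
          omega
        rw [hrng, Int.toNat_natCast]
        exact pvTableInv xs LN hLN1 (xs.length - LN) (by omega)
          (List.replicate (xs.length + 1) 0)
          (by simp)
          (fun k' hk' => by
            rw [pvReplicateGetD, pvCpl_drop_zero xs k' LN (by omega)]
            rfl)
          (fun k' _ => pvReplicateGetD _ _) k
      · -- LN > length: the countdown range is empty and every pvCpl is 0
        have hrng : PySem.List.pyRange ((xs.length : Int) - (LN : Int) - 1) (-1) (-1) = [] := by
          apply PySem.List.pyRange_neg_one_eq_nil
          omega
        rw [hrng]
        simp only [List.foldl_nil]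
        rw [pvReplicateGetD, pvCpl_drop_zero xs k LN (by omega)]
        rfl
    apply PySem.List.foldl_congr_mem
    intro acc' start hs
    rw [PySem.List.mem_pyRange_one] at hs
    obtain ⟨sN, rfl⟩ : ∃ m : Nat, start = (m : Int) :=
      ⟨start.toNat, (Int.toNat_of_nonneg (by omega)).symm⟩
    have hsb : sN + LN < xs.length := by
      have := hs.2
      omega
    have hcnt : pvCountLoopA xs
          (PySem.List.slice xs (some (sN : Int)) (some ((sN : Int) + (LN : Int)))) (LN : Int)
          (PySem.List.pyRange (sN : Int) ((xs.length : Int) - (LN : Int) + 1) (LN : Int)) 0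
        = 1 + PySem.Int.floordiv (PySem.List.pyGetD
            ((PySem.List.pyRange ((xs.length : Int) - (LN : Int) - 1) (-1) (-1)).foldl (fun e s =>
              if PySem.List.pyGetD xs s 0 = PySem.List.pyGetD xs (s + (LN : Int)) 0 then
                PySem.List.pySetD e s (PySem.List.pyGetD e (s + 1) 0 + 1)
              else e)
              (List.replicate (((xs.length : Int)).toNat + 1) (0 : Int))) (sN : Int) 0) (LN : Int) := by
      rw [pvCountA_eq xs sN LN hLN1 hsb]
      rw [PySem.List.pyGetD_natCast, htab sN, PySem.Int.floordiv_natCast]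
    exact congrArg
      (fun cnt : Int => if acc'.1 < cnt then (cnt, (sN : Int), (LN : Int)) else acc') hcnt
  exact congrArg
    (fun st : Int × Int × Int => if 1 < st.1 then some [st.2.1, st.1, st.2.2] else none) houter
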